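-- pv_equiv track=rewrite | github.com/ayoubzulfiqar/Leetcode-Medium | PartitionStringIntoSubstringsWithValuesatMostK/partition_string_into_substrings_with_values_at_most_k.py | minimumPartition
-- ===== SOURCE A (Python) =====
-- def minimumPartition(s: str, k: int) -> int:
--     n = len(s)
--     num_substrings = 0
--     current_idx = 0
--
--     while current_idx < n:
--         num_substrings += 1
--         current_val = 0
--
--         # j will be the potential end index of the current substring + 1
--         j = current_idx
--         while j < n:
--             digit = int(s[j])
--
--             # If this is the first digit of a new substring (current_val is 0)
--             # and the digit itself is greater than k, then no valid partition exists.
--             # Digits are guaranteed to be '1' through '9', so digit will always be >= 1.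
--             if current_val == 0 and digit > k:
--                 return -1
--
--             # Calculate the value if we append the current digit.
--             # Python handles large integers, so `current_val * 10 + digit`
--             # will not overflow standard integer limits.
--             potential_val = current_val * 10 + digit
--
--             if potential_val <= k:
--                 current_val = potential_val
--                 j += 1 # Extend the current substring and move to the next character
--             else:
--                 # Cannot extend the current substring with s[j] as it would exceed k.
--                 # The current substring ends at s[j-1].
--                 break
--
--         # After the inner loop, j points to the character where the next substring should start.
--         # Update current_idx for the next iteration of the outer loop.
--         current_idx = j
--
--     return num_substrings
-- ===== SOURCE B (Python) =====
-- def minimumPartition(s: str, k: int) -> int: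
--     digits = []
--     for ch in s:
--         d = int(ch)
--         if d > k:
--             return -1
--         digits.append(d)
--     # dp[0] = minimum number of pieces needed for the current suffix; built right-to-left
--     # by trying EVERY feasible first piece (value <= k) and taking the minimum.
--     dp = [0]
--     suffix = []
--     for d in reversed(digits):
--         suffix = [d] + suffix
--         best = len(suffix) + 1
--         val = 0
--         for dj, dpn in zip(suffix, dp):
--             val = val * 10 + dj
--             if val > k:
--                 break
--             if 1 + dpn < best:
--                 best = 1 + dpn
--         dp = [best] + dp
--     return dp[0]
-- ===== Notes on version B (the rewrite author's own statement) =====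
-- stated objective: alternative
-- what changed: Replaces A's greedy maximal-extension scan by a right-to-left dynamic program that, for every suffix, tries EVERY feasible first piece (value <= k) and takes the minimum over a dp table; equal because feasible prefixes are closed under shortening, which makes the dp values monotone over suffixes, so the greedy choice attains the minimum.
import Mathlib
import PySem

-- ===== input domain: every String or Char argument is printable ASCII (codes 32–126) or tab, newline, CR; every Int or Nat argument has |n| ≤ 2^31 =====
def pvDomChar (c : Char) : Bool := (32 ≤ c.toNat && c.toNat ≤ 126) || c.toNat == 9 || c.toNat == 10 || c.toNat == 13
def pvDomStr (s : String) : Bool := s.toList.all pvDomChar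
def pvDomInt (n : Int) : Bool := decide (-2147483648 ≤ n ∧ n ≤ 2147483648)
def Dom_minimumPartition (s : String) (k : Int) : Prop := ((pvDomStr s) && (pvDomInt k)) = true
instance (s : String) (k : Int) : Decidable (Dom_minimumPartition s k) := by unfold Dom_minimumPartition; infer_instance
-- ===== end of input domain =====

-- B replaces A's greedy maximal extension by a right-to-left dynamic program minimizing over
-- all feasible first pieces (alternative algorithm, same results).

-- ===== PORT A =====

-- int(s[j]) for a single char: exact for '0'..'9' (Pre_ restricts to digit chars; Python raises otherwise)
def pyDigit (c : Char) : Int := (c.toNat : Int) - 48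

-- inner while loop of A: consumes the current substring; none = 'return -1', some r = loop broke/ended with remaining chars r
def aInner (k : Int) : List Char → Int → Option (List Char)
  | [], _ => some []
  | c :: rest, cur =>
    let d := pyDigit c
    if cur = 0 ∧ d > k then none
    else if cur * 10 + d ≤ k then aInner k rest (cur * 10 + d)
    else some (c :: rest)

-- one-step equations for A's inner loop (needed by aOuter's termination proof, so stated here)
theorem aInner_cons_none (k : Int) (c : Char) (rest : List Char) (cur : Int)
    (h1 : cur = 0) (h2 : pyDigit c > k) : aInner k (c :: rest) cur = none := by
  simp [aInner, h1, h2]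

theorem aInner_cons_ext (k : Int) (c : Char) (rest : List Char) (cur : Int)
    (h1 : ¬(cur = 0 ∧ pyDigit c > k)) (h2 : cur * 10 + pyDigit c ≤ k) :
    aInner k (c :: rest) cur = aInner k rest (cur * 10 + pyDigit c) := by
  simp only [aInner, if_neg h1, if_pos h2]

theorem aInner_cons_break (k : Int) (c : Char) (rest : List Char) (cur : Int)
    (h1 : ¬(cur = 0 ∧ pyDigit c > k)) (h2 : ¬ cur * 10 + pyDigit c ≤ k) :
    aInner k (c :: rest) cur = some (c :: rest) := by
  simp only [aInner, if_neg h1, if_neg h2]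

theorem aInner_zero_lo (k : Int) (c : Char) (rest : List Char) (h : pyDigit c ≤ k) :
    aInner k (c :: rest) 0 = aInner k rest (pyDigit c) := by
  have e : (0 : Int) * 10 + pyDigit c = pyDigit c := by ring
  rw [aInner_cons_ext k c rest 0 (by omega) (by omega), e]

theorem aInner_length (k : Int) : ∀ (l : List Char) (cur : Int) (r : List Char),
    aInner k l cur = some r → r.length ≤ l.length := by
  intro l
  induction l with
  | nil =>
    intro cur r h
    simp only [aInner, Option.some.injEq] at h
    simp [← h]
  | cons c rest ih =>
    intro cur r h
    by_cases h1 : cur = 0 ∧ pyDigit c > k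
    · rw [aInner_cons_none k c rest cur h1.1 h1.2] at h
      exact absurd h (by simp)
    · by_cases h2 : cur * 10 + pyDigit c ≤ k
      · rw [aInner_cons_ext k c rest cur h1 h2] at h
        have := ih (cur * 10 + pyDigit c) r h
        simp only [List.length_cons]
        omega
      · rw [aInner_cons_break k c rest cur h1 h2] at h
        injection h with h
        rw [← h]

theorem aInner_zero_length (k : Int) (c : Char) (rest r : List Char)
    (h : aInner k (c :: rest) 0 = some r) : r.length < (c :: rest).length := by
  by_cases h3 : pyDigit c > k
  · rw [aInner_cons_none k c rest 0 rfl h3] at h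
    exact absurd h (by simp)
  · push_neg at h3
    rw [aInner_zero_lo k c rest h3] at h
    have := aInner_length k rest (pyDigit c) r h
    simp only [List.length_cons]
    omega

-- outer while loop of A, accumulating num_substrings
def aOuter (k : Int) (l : List Char) (count : Int) : Int :=
  match l with
  | [] => count
  | c :: rest =>
    match h : aInner k (c :: rest) 0 with
    | none => -1
    | some r => aOuter k r (count + 1)
termination_by l.length
decreasing_by exact aInner_zero_length k c rest r h

def minimumPartition (s : String) (k : Int) : Int := aOuter k s.toList 0

-- ===== PORT B =====

-- B's first pass: convert characters one by one, returning none (= early 'return -1')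
-- at the first digit exceeding k
def bConv (k : Int) : List Char → Option (List Int)
  | [] => some []
  | c :: rest =>
    let d := pyDigit c
    if d > k then none
    else
      match bConv k rest with
      | none => none
      | some ds => some (d :: ds)

-- B's inner loop: walk the (digit, dp-of-rest) pairs, break when the piece value exceeds k,
-- keep the least candidate 1 + dpn seen so far in best
def bInner (k : Int) : Int → Int → List (Int × Int) → Int
  | _, best, [] => best
  | val, best, (dj, dpn) :: t =>
    let v := val * 10 + dj
    if v > k then best
    else bInner k v (if 1 + dpn < best then 1 + dpn else best) t

-- B's dp table, built right-to-left over the suffixes: bDp ds = dp value of every suffix of ds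
def bDp (k : Int) : List Int → List Int
  | [] => [0]
  | d :: rest =>
    let dpR := bDp k rest
    bInner k 0 (((d :: rest).length : Int) + 1) ((d :: rest).zip dpR) :: dpR

def minimumPartition_alt (s : String) (k : Int) : Int :=
  match bConv k s.toList with
  | none => -1
  | some ds => (bDp k ds).headD 0

-- ===== PRECONDITION & SPEC =====
-- Pre_: exactly the inputs on which Python A returns: either every character is a digit, or some
-- digit before the first non-digit exceeds k (then A returns -1 before reaching the non-digit);
-- on every other input A raises ValueError at int(s[j]) on the first non-digit character.
def Pre_minimumPartition (s : String) (k : Int) : Prop :=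
  (s.toList.all (fun c => PySem.Chars.isdigit c)
    || (s.toList.takeWhile (fun c => PySem.Chars.isdigit c)).any (fun c => decide (pyDigit c > k))) = true
instance (s : String) (k : Int) : Decidable (Pre_minimumPartition s k) := by unfold Pre_minimumPartition; infer_instance
def pvWitness_minimumPartition : String × Int := ("165", 6)

def Spec_minimumPartition (s : String) (k : Int) (out : Int) : Prop := out = minimumPartition_alt s k
instance (s : String) (k : Int) (out : Int) : Decidable (Spec_minimumPartition s k out) := by unfold Spec_minimumPartition; infer_instance

-- ===== CLAIM (what is proved, stated in full; the proofs are below) =====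
def Claim_equal_minimumPartition : Prop := ∀ (s : String) (k : Int), Dom_minimumPartition s k → Pre_minimumPartition s k → Spec_minimumPartition s k (minimumPartition s k)

-- ===== LEMMAS AND PROOFS =====

-- how many digits a piece accumulating from value cur can still absorb before exceeding k
def extL (k : Int) (cur : Int) : List Int → Nat
  | [] => 0
  | d :: t => if cur * 10 + d ≤ k then extL k (cur * 10 + d) t + 1 else 0

-- the greedy count A computes, as a function of the digit list
def gMin (k : Int) : List Int → Int
  | [] => 0
  | d :: t => 1 + gMin k (t.drop (extL k d t))
termination_by l => l.length
decreasing_by simp only [List.length_drop, List.length_cons]; omega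

theorem gMin_nil (k : Int) : gMin k [] = 0 := by rw [gMin.eq_1]

theorem gMin_cons (k d : Int) (t : List Int) :
    gMin k (d :: t) = 1 + gMin k (t.drop (extL k d t)) := by rw [gMin.eq_2]

theorem extL_le_length (k : Int) : ∀ (l : List Int) (cur : Int), extL k cur l ≤ l.length := by
  intro l
  induction l with
  | nil => intro cur; simp [extL]
  | cons d t ih =>
    intro cur
    simp only [extL, List.length_cons]
    split
    · have := ih (cur * 10 + d); omega
    · omega

theorem extL_mono (k : Int) : ∀ (l : List Int) (cur cur' : Int), 0 ≤ cur → cur ≤ cur' →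
    (∀ d ∈ l, 0 ≤ d) → extL k cur' l ≤ extL k cur l := by
  intro l
  induction l with
  | nil => intro cur cur' _ _ _; simp [extL]
  | cons d t ih =>
    intro cur cur' h0 hle hd
    have hd0 : 0 ≤ d := hd d (by simp)
    simp only [extL]
    by_cases h' : cur' * 10 + d ≤ k
    · have h : cur * 10 + d ≤ k := by nlinarith
      rw [if_pos h', if_pos h]
      have := ih (cur * 10 + d) (cur' * 10 + d) (by omega) (by omega)
        (fun x hx => hd x (List.mem_cons_of_mem _ hx))
      omega
    · rw [if_neg h']
      omega

theorem gMin_le_length (k : Int) : ∀ (n : Nat) (l : List Int), l.length ≤ n →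
    gMin k l ≤ l.length := by
  intro n
  induction n with
  | zero =>
    intro l hl
    have : l = [] := List.eq_nil_of_length_eq_zero (by omega)
    simp [this, gMin_nil]
  | succ n ih =>
    intro l hl
    cases l with
    | nil => simp [gMin_nil]
    | cons d t =>
      rw [gMin_cons]
      have h1 : (t.drop (extL k d t)).length ≤ n := by
        simp only [List.length_drop]
        simp only [List.length_cons] at hl
        omega
      have := ih (t.drop (extL k d t)) h1
      simp only [List.length_drop] at this ⊢
      simp only [List.length_cons]
      omega

-- monotonicity of the greedy count over suffixes: dropping digits never needs more pieces
theorem gMin_drop_le (k : Int) : ∀ (n : Nat) (l : List Int), l.length ≤ n →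
    (∀ d ∈ l, 0 ≤ d) → ∀ (i : Nat), gMin k (l.drop i) ≤ gMin k l := by
  intro n
  induction n with
  | zero =>
    intro l hl _ i
    have : l = [] := List.eq_nil_of_length_eq_zero (by omega)
    subst this
    simp
  | succ n ih =>
    intro l hl hd i
    cases i with
    | zero => simp
    | succ i' =>
      cases l with
      | nil => simp [List.drop_nil]
      | cons a u =>
        simp only [List.drop_succ_cons]
        have hu : u.length ≤ n := by simp only [List.length_cons] at hl; omega
        have hdu : ∀ d ∈ u, 0 ≤ d := fun d hmem => hd d (List.mem_cons_of_mem _ hmem)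
        have step1 : gMin k (u.drop i') ≤ gMin k u := ih u hu hdu i'
        -- now the single-step monotonicity gMin u ≤ gMin (a :: u)
        have step2 : gMin k u ≤ gMin k (a :: u) := by
          cases u with
          | nil => simp [gMin_nil, gMin_cons]
          | cons e0 t =>
            conv_rhs => rw [gMin_cons]
            rcases he : extL k a (e0 :: t) with _ | e''
            · -- extension length 0: a alone is the piece
              rw [List.drop_zero]
              omega
            · -- a's piece absorbs e'' + 1 digits of e0 :: t
              have ha0 : 0 ≤ a := hd a (List.mem_cons_self ..)
              have he0 : 0 ≤ e0 := hd e0 (by simp)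
              simp only [extL] at he
              by_cases hfe : a * 10 + e0 ≤ k
              · rw [if_pos hfe] at he
                have he2 : extL k (a * 10 + e0) t = e'' := by omega
                rw [List.drop_succ_cons]
                -- gMin (e0 :: t) = 1 + gMin (t.drop m) with m = extL k e0 t ≥ e''
                rw [gMin_cons]
                have hm : e'' ≤ extL k e0 t := by
                  rw [← he2]
                  exact extL_mono k t e0 (a * 10 + e0) he0 (by omega)
                    (fun x hx => hdu x (List.mem_cons_of_mem _ hx))
                have hdec : t.drop (extL k e0 t) = (t.drop e'').drop (extL k e0 t - e'') := by
                  rw [List.drop_drop]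
                  congr 1
                  omega
                have hrec : gMin k (t.drop (extL k e0 t)) ≤ gMin k (t.drop e'') := by
                  rw [hdec]
                  refine ih (t.drop e'') ?_ ?_ _
                  · simp only [List.length_drop]
                    simp only [List.length_cons] at hl
                    omega
                  · intro d hmem
                    exact hdu d (List.mem_cons_of_mem _ (List.mem_of_mem_drop hmem))
                omega
              · rw [if_neg hfe] at he
                exact absurd he (by omega)
        omega

-- the inner minimization: starting from a best all candidates beat, with nonincreasing dp values,
-- bInner returns best when no digit fits, else 1 + the dp value after the LONGEST feasible piece
theorem bInner_eq (k : Int) : ∀ (l dps : List Int) (val best : Int), 0 ≤ val →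
    (∀ d ∈ l, 0 ≤ d) → dps.length = l.length → (∀ x ∈ dps, 1 + x ≤ best) →
    List.Pairwise (fun a b => b ≤ a) dps →
    bInner k val best (l.zip dps) =
      (if extL k val l = 0 then best else 1 + dps.getD (extL k val l - 1) 0) := by
  intro l
  induction l with
  | nil =>
    intro dps val best _ _ _ _ _
    simp [bInner, extL]
  | cons d t ih =>
    intro dps val best hval hdig hlen hbd hpw
    cases dps with
    | nil => simp at hlen
    | cons p ps =>
      simp only [List.zip_cons_cons, bInner]
      by_cases hv : val * 10 + d > k
      · rw [if_pos hv]
        have : extL k val (d :: t) = 0 := by simp only [extL]; rw [if_neg (by omega)]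
        simp [this]
      · rw [if_neg hv]
        have hbest' : (if 1 + p < best then 1 + p else best) = 1 + p := by
          have := hbd p (by simp)
          split <;> omega
        rw [hbest']
        have hd0 : 0 ≤ d := hdig d (by simp)
        have hps_le : ∀ x ∈ ps, x ≤ p := by
          intro x hx
          exact (List.pairwise_cons.mp hpw).1 x hx
        have := ih ps (val * 10 + d) (1 + p) (by omega)
          (fun x hx => hdig x (List.mem_cons_of_mem _ hx))
          (by simp only [List.length_cons] at hlen; omega)
          (fun x hx => by have := hps_le x hx; omega)
          (List.pairwise_cons.mp hpw).2
        rw [this]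
        have hext : extL k val (d :: t) = extL k (val * 10 + d) t + 1 := by
          simp only [extL]; rw [if_pos (by omega)]
        rw [hext]
        rcases he : extL k (val * 10 + d) t with _ | e
        · simp
        · simp

-- bDp has one entry per suffix
theorem bDp_length (k : Int) : ∀ (ds : List Int), (bDp k ds).length = ds.length + 1 := by
  intro ds
  induction ds with
  | nil => simp [bDp]
  | cons d rest ih => simp [bDp, ih]

-- the j-th entry of bDp is the dp value of the j-th suffix
theorem bDp_getD (k : Int) : ∀ (ds : List Int) (j : Nat), j ≤ ds.length →
    (bDp k ds).getD j 0 = (bDp k (ds.drop j)).headD 0 := by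
  intro ds
  induction ds with
  | nil =>
    intro j hj
    have : j = 0 := by simpa using hj
    simp [this, bDp]
  | cons d rest ih =>
    intro j hj
    cases j with
    | zero =>
      show (bDp k (d :: rest)).getD 0 0 = (bDp k (d :: rest)).headD 0
      cases h : bDp k (d :: rest) <;> simp
    | succ j' =>
      simp only [bDp, List.getD_cons_succ, List.drop_succ_cons]
      exact ih j' (by simp only [List.length_cons] at hj; omega)

-- main B-side invariant: the head of the dp table is the greedy count
theorem bDp_eq_gMin (k : Int) : ∀ (n : Nat) (ds : List Int), ds.length ≤ n →
    (∀ d ∈ ds, 0 ≤ d ∧ d ≤ k) → (bDp k ds).headD 0 = gMin k ds := by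
  intro n
  induction n with
  | zero =>
    intro ds hl _
    have : ds = [] := List.eq_nil_of_length_eq_zero (by omega)
    simp [this, bDp, gMin_nil]
  | succ n ih =>
    intro ds hl hd
    cases ds with
    | nil => simp [bDp, gMin_nil]
    | cons d rest =>
      have hrest_len : rest.length ≤ n := by simp only [List.length_cons] at hl; omega
      have hdrest : ∀ x ∈ rest, 0 ≤ x ∧ x ≤ k := fun x hx => hd x (List.mem_cons_of_mem _ hx)
      have hdR_len : (bDp k rest).length = rest.length + 1 := bDp_length k rest
      -- every dp entry of rest equals gMin of the corresponding suffix
      have hentry : ∀ j : Nat, j ≤ rest.length →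
          (bDp k rest).getD j 0 = gMin k (rest.drop j) := by
        intro j hj
        rw [bDp_getD k rest j hj]
        refine ih (rest.drop j) ?_ ?_
        · simp only [List.length_drop]; omega
        · intro x hx; exact hdrest x (List.mem_of_mem_drop hx)
      -- bound: every entry is at most rest.length
      have hbound : ∀ x ∈ bDp k rest, 1 + x ≤ ((d :: rest).length : Int) + 1 := by
        intro x hx
        obtain ⟨j, hj, hget⟩ := List.mem_iff_getElem.mp hx
        have hj' : j ≤ rest.length := by omega
        have : (bDp k rest).getD j 0 = x := by
          rw [List.getD_eq_getElem _ _ hj]; exact hget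
        rw [hentry j hj'] at this
        have h1 : gMin k (rest.drop j) ≤ (rest.drop j).length :=
          gMin_le_length k (rest.drop j).length _ le_rfl
        simp only [List.length_drop] at h1
        simp only [List.length_cons]
        push_cast
        omega
      -- the dp entries are nonincreasing
      have hpw : List.Pairwise (fun a b => b ≤ a) (bDp k rest) := by
        rw [List.pairwise_iff_getElem]
        intro i j hi hj hij
        have hgi : (bDp k rest)[i] = gMin k (rest.drop i) := by
          rw [← List.getD_eq_getElem _ 0 hi, hentry i (by omega)]
        have hgj : (bDp k rest)[j] = gMin k (rest.drop j) := by
          rw [← List.getD_eq_getElem _ 0 hj, hentry j (by omega)]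
        rw [hgi, hgj]
        have : rest.drop j = (rest.drop i).drop (j - i) := by
          rw [List.drop_drop]; congr 1; omega
        rw [this]
        refine gMin_drop_le k (rest.drop i).length (rest.drop i) le_rfl ?_ _
        intro x hx; exact (hdrest x (List.mem_of_mem_drop hx)).1
      -- compute the head of bDp (d :: rest)
      show (bDp k (d :: rest)).headD 0 = gMin k (d :: rest)
      rw [bDp]
      simp only [List.headD_cons]
      rw [bInner_eq k (d :: rest) (bDp k rest) 0 (((d :: rest).length : Int) + 1) le_rfl
        (fun x hx => (hd x hx).1) (by rw [hdR_len]; simp) hbound hpw]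
      have hdk : d ≤ k := (hd d (by simp)).2
      have hd0 : 0 ≤ d := (hd d (by simp)).1
      have hext : extL k 0 (d :: rest) = extL k d rest + 1 := by
        simp only [extL]
        rw [if_pos (by omega)]
        congr 1
        · congr 1; ring
      rw [hext]
      rw [if_neg (by omega)]
      have he_le : extL k d rest ≤ rest.length := extL_le_length k rest d
      simp only [Nat.add_sub_cancel]
      rw [hentry (extL k d rest) he_le]
      rw [gMin_cons]

-- a digit character has a nonnegative digit value
theorem isdigit_pyDigit (c : Char) (h : PySem.Chars.isdigit c = true) : 0 ≤ pyDigit c := by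
  simp [PySem.Chars.isdigit, Char.le_def] at h
  have h1 : (48:UInt32).toNat ≤ c.val.toNat := UInt32.le_iff_toNat_le.mp h.1
  have h2 : c.toNat = c.val.toNat := rfl
  have h3 : (48:UInt32).toNat = 48 := rfl
  unfold pyDigit
  omega

-- A-side: the inner loop consumes exactly extL digits when every char is a digit ≤ k
theorem aInner_some (k : Int) : ∀ (l : List Char) (cur : Int), 0 ≤ cur →
    (∀ c ∈ l, PySem.Chars.isdigit c = true ∧ pyDigit c ≤ k) →
    aInner k l cur = some (l.drop (extL k cur (l.map pyDigit))) := by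
  intro l
  induction l with
  | nil => intro cur _ _; simp [aInner, extL]
  | cons c t ih =>
    intro cur hcur hc
    have hck : pyDigit c ≤ k := (hc c (by simp)).2
    have h1 : ¬(cur = 0 ∧ pyDigit c > k) := by omega
    by_cases h2 : cur * 10 + pyDigit c ≤ k
    · rw [aInner_cons_ext k c t cur h1 h2]
      have hc0 : 0 ≤ pyDigit c := isdigit_pyDigit c (hc c (by simp)).1
      rw [ih (cur * 10 + pyDigit c) (by omega) (fun x hx => hc x (List.mem_cons_of_mem _ hx))]
      have : extL k cur ((c :: t).map pyDigit) = extL k (cur * 10 + pyDigit c) (t.map pyDigit) + 1 := by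
        simp only [List.map_cons, extL]
        rw [if_pos h2]
      rw [this, List.drop_succ_cons]
    · rw [aInner_cons_break k c t cur h1 h2]
      have : extL k cur ((c :: t).map pyDigit) = 0 := by
        simp only [List.map_cons, extL]
        rw [if_neg h2]
      rw [this, List.drop_zero]

-- one-step equation for A's outer loop
theorem aOuter_cons (k : Int) (c : Char) (rest : List Char) (m : Int) :
    aOuter k (c :: rest) m
      = (match aInner k (c :: rest) 0 with
         | none => (-1 : Int)
         | some r => aOuter k r (m + 1)) := by
  rw [aOuter]
  split
  · rename_i hr; simp only [hr]
  · rename_i r hr; simp only [hr]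

-- A-side: when every char is a digit ≤ k, the outer loop counts greedy pieces
theorem aOuter_eq_gMin (k : Int) : ∀ (n : Nat) (l : List Char) (m : Int), l.length ≤ n →
    (∀ c ∈ l, PySem.Chars.isdigit c = true ∧ pyDigit c ≤ k) →
    aOuter k l m = m + gMin k (l.map pyDigit) := by
  intro n
  induction n with
  | zero =>
    intro l m hl _
    have : l = [] := List.eq_nil_of_length_eq_zero (by omega)
    simp [this, aOuter, gMin_nil]
  | succ n ih =>
    intro l m hl hc
    cases l with
    | nil => simp [aOuter, gMin_nil]
    | cons c t =>
      have hck : pyDigit c ≤ k := (hc c (by simp)).2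
      have hc0 : 0 ≤ pyDigit c := isdigit_pyDigit c (hc c (by simp)).1
      have hct : ∀ x ∈ t, PySem.Chars.isdigit x = true ∧ pyDigit x ≤ k :=
        fun x hx => hc x (List.mem_cons_of_mem _ hx)
      rw [aOuter_cons, aInner_zero_lo k c t hck,
        aInner_some k t (pyDigit c) hc0 hct]
      show aOuter k (t.drop (extL k (pyDigit c) (t.map pyDigit))) (m + 1)
          = m + gMin k ((c :: t).map pyDigit)
      have hdrop_len : (t.drop (extL k (pyDigit c) (t.map pyDigit))).length ≤ n := by
        simp only [List.length_drop]
        simp only [List.length_cons] at hl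
        omega
      rw [ih _ (m + 1) hdrop_len (fun x hx => hct x (List.mem_of_mem_drop hx))]
      have : (t.drop (extL k (pyDigit c) (t.map pyDigit))).map pyDigit
          = (t.map pyDigit).drop (extL k (pyDigit c) (t.map pyDigit)) := by
        rw [List.map_drop]
      rw [this]
      simp only [List.map_cons]
      rw [gMin_cons]
      ring

-- A-side: if an over-k digit follows a prefix of digits ≤ k, the inner loop hits -1 or stops before it
theorem aInner_bad (k : Int) (c : Char) (t : List Char) (hc : pyDigit c > k) :
    ∀ (p : List Char) (cur : Int), 0 ≤ cur →
    (∀ x ∈ p, PySem.Chars.isdigit x = true ∧ pyDigit x ≤ k) →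
    aInner k (p ++ c :: t) cur = none ∨
      ∃ p', (∀ x ∈ p', PySem.Chars.isdigit x = true ∧ pyDigit x ≤ k) ∧
        aInner k (p ++ c :: t) cur = some (p' ++ c :: t) := by
  intro p
  induction p with
  | nil =>
    intro cur hcur _
    by_cases h0 : cur = 0
    · left
      simpa using aInner_cons_none k c t cur h0 hc
    · right
      refine ⟨[], by simp, ?_⟩
      simpa using aInner_cons_break k c t cur (by omega) (by nlinarith)
  | cons a p' ih =>
    intro cur hcur hp
    have hak : pyDigit a ≤ k := (hp a (by simp)).2
    have ha0 : 0 ≤ pyDigit a := isdigit_pyDigit a (hp a (by simp)).1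
    have h1 : ¬(cur = 0 ∧ pyDigit a > k) := by omega
    by_cases h2 : cur * 10 + pyDigit a ≤ k
    · rw [List.cons_append, aInner_cons_ext k a (p' ++ c :: t) cur h1 h2]
      exact ih (cur * 10 + pyDigit a) (by omega) (fun x hx => hp x (List.mem_cons_of_mem _ hx))
    · right
      refine ⟨a :: p', hp, ?_⟩
      rw [List.cons_append, aInner_cons_break k a (p' ++ c :: t) cur h1 h2]

-- A-side: with such a bad decomposition the outer loop returns -1
theorem aOuter_bad (k : Int) : ∀ (n : Nat) (l : List Char) (m : Int), l.length ≤ n →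
    (∃ p c t, l = p ++ c :: t ∧ (∀ x ∈ p, PySem.Chars.isdigit x = true ∧ pyDigit x ≤ k) ∧
      pyDigit c > k) →
    aOuter k l m = -1 := by
  intro n
  induction n with
  | zero =>
    intro l m hl hbad
    obtain ⟨p, c, t, hdec, _, _⟩ := hbad
    have : l.length ≠ 0 := by rw [hdec]; simp
    omega
  | succ n ih =>
    intro l m hl hbad
    obtain ⟨p, c, t, hdec, hp, hc⟩ := hbad
    cases p with
    | nil =>
      subst hdec
      simp only [List.nil_append]
      rw [aOuter_cons, aInner_cons_none k c t 0 rfl hc]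
    | cons a p' =>
      subst hdec
      rcases aInner_bad k c t hc (a :: p') 0 le_rfl hp with hnone | ⟨p'', hp'', hsome⟩
      · rw [List.cons_append] at hnone ⊢
        rw [aOuter_cons, hnone]
      · rw [List.cons_append] at hsome ⊢
        rw [aOuter_cons, hsome]
        have hlt : (p'' ++ c :: t).length < (a :: (p' ++ c :: t)).length :=
          aInner_zero_length k a (p' ++ c :: t) _ hsome
        refine ih (p'' ++ c :: t) (m + 1) ?_ ⟨p'', c, t, rfl, hp'', hc⟩
        simp only [List.length_cons, List.length_append] at hlt hl ⊢
        omega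

-- B-side: full digit conversion when every digit is ≤ k
theorem bConv_some (k : Int) : ∀ (l : List Char), (∀ c ∈ l, pyDigit c ≤ k) →
    bConv k l = some (l.map pyDigit) := by
  intro l
  induction l with
  | nil => intro _; simp [bConv]
  | cons c t ih =>
    intro h
    simp only [bConv]
    rw [if_neg (by have := h c (by simp); omega), ih (fun x hx => h x (List.mem_cons_of_mem _ hx))]
    simp

-- B-side: conversion hits the early 'return -1' at the first over-k digit
theorem bConv_bad (k : Int) (c : Char) (t : List Char) (hc : pyDigit c > k) :
    ∀ (p : List Char), (∀ x ∈ p, pyDigit x ≤ k) → bConv k (p ++ c :: t) = none := by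
  intro p
  induction p with
  | nil => intro _; simp [bConv]; omega
  | cons a p' ih =>
    intro hp
    simp only [List.cons_append, bConv]
    rw [if_neg (by have := hp a (by simp); omega), ih (fun x hx => hp x (List.mem_cons_of_mem _ hx))]

-- the first element surviving dropWhile fails the predicate
theorem dropWhile_head_false (P : Char → Bool) : ∀ (l : List Char) (c : Char) (t : List Char),
    l.dropWhile P = c :: t → P c = false := by
  intro l
  induction l with
  | nil => intro c t h; simp [List.dropWhile] at h
  | cons a l' ih =>
    intro c t h
    by_cases ha : P a
    · rw [List.dropWhile_cons_of_pos ha] at h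
      exact ih c t h
    · rw [List.dropWhile_cons_of_neg ha] at h
      cases h
      simpa using ha

-- Pre_ splits every admitted input into the all-digits-≤-k case and the bad-digit case
theorem pre_cases (k : Int) (l : List Char)
    (hpre : (l.all (fun c => PySem.Chars.isdigit c)
      || (l.takeWhile (fun c => PySem.Chars.isdigit c)).any (fun c => decide (pyDigit c > k))) = true) :
    (∀ c ∈ l, PySem.Chars.isdigit c = true ∧ pyDigit c ≤ k) ∨
    (∃ p c t, l = p ++ c :: t ∧ (∀ x ∈ p, PySem.Chars.isdigit x = true ∧ pyDigit x ≤ k) ∧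
      pyDigit c > k) := by
  by_cases hall : ∀ c ∈ l, PySem.Chars.isdigit c = true ∧ pyDigit c ≤ k
  · exact Or.inl hall
  · right
    set P : Char → Bool := fun x => PySem.Chars.isdigit x && decide (pyDigit x ≤ k) with hP
    have hnotallP : ¬ ∀ x ∈ l, P x = true := by
      intro h
      exact hall (fun c hc => by have := h c hc; simp [hP] at this; exact this)
    have hdw : l.dropWhile P ≠ [] := by
      intro h
      exact hnotallP (List.dropWhile_eq_nil_iff.mp h)
    obtain ⟨c, t, hct⟩ := List.exists_cons_of_ne_nil hdw
    refine ⟨l.takeWhile P, c, t, ?_, ?_, ?_⟩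
    · rw [← hct, List.takeWhile_append_dropWhile]
    · intro x hx
      have := List.mem_takeWhile_imp hx
      simp [hP] at this
      exact this
    · -- c (the first char failing P) must satisfy pyDigit c > k
      have hcP : P c = false := dropWhile_head_false P l c t hct
      rw [Bool.or_eq_true] at hpre
      rcases hpre with hpre | hpre
      · -- every char is a digit, so c fails the ≤ k half
        simp only [List.all_eq_true] at hpre
        have hcd : PySem.Chars.isdigit c = true := by
          refine hpre c ?_
          have : c ∈ l.dropWhile P := by rw [hct]; simp
          exact (List.dropWhile_sublist P).mem this
        simp [hP, hcd] at hcP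
        omega
      · -- an over-k digit sits in the digit prefix
        simp only [List.any_eq_true, decide_eq_true_eq] at hpre
        obtain ⟨c0, hc0mem, hc0k⟩ := hpre
        by_cases hcd : PySem.Chars.isdigit c = true
        · simp [hP, hcd] at hcP
          omega
        · -- c is not a digit: then takeWhile isdigit l = takeWhile P l, so c0 satisfies P — contradiction
          exfalso
          have hPle : ∀ x, P x = true → PySem.Chars.isdigit x = true := by
            intro x hx; simp [hP] at hx; exact hx.1
          have htw_eq : l.takeWhile (fun c => PySem.Chars.isdigit c) = l.takeWhile P := by
            conv_lhs => rw [← List.takeWhile_append_dropWhile (p := P) (l := l), hct]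
            rw [List.takeWhile_append_of_pos
              (fun x hx => hPle x (List.mem_takeWhile_imp hx)),
              List.takeWhile_cons_of_neg (by simpa using hcd)]
            simp
          rw [htw_eq] at hc0mem
          have := List.mem_takeWhile_imp hc0mem
          simp [hP] at this
          omega

-- ===== VERDICT (by name: the statement is the Claim_ definition above) =====
theorem minimumPartition_spec : Claim_equal_minimumPartition := by
  intro s k _ hpre
  unfold Spec_minimumPartition minimumPartition minimumPartition_alt
  unfold Pre_minimumPartition at hpre
  rcases pre_cases k s.toList hpre with hgood | hbad
  · rw [bConv_some k s.toList (fun c hc => (hgood c hc).2)]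
    rw [aOuter_eq_gMin k s.toList.length s.toList 0 le_rfl hgood]
    show 0 + gMin k (s.toList.map pyDigit) = (bDp k (s.toList.map pyDigit)).headD 0
    rw [bDp_eq_gMin k (s.toList.map pyDigit).length (s.toList.map pyDigit) le_rfl ?hcond]
    · simp
    case hcond =>
      intro d hd
      obtain ⟨c, hc, rfl⟩ := List.mem_map.mp hd
      exact ⟨isdigit_pyDigit c (hgood c hc).1, (hgood c hc).2⟩
  · obtain ⟨p, c, t, hdec, hp, hc⟩ := hbad
    rw [aOuter_bad k s.toList.length s.toList 0 le_rfl ⟨p, c, t, hdec, hp, hc⟩]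
    rw [hdec, bConv_bad k c t hc p (fun x hx => (hp x hx).2)]
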